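-- pv_equiv track=rewrite | github.com/markerlim/geekstack-automations | service/mappings/haikyuu_mappings.py | parse_compound_phase_keyword
-- ===== SOURCE A (Python) =====
-- ICON_SUFFIX_MAPPING = {
--     "tefuda": "From Hand",
--     "itadaki": "From Top",
-- }
--
-- def parse_compound_phase_keyword(keyword_clean, suffix=None):
--     """
--     Parse compound phase keywords like "blockphase" or "blockreceivephase".
--
--     This function attempts to extract individual phase keywords from concatenated
--     phase names by looking for known keywords. If a suffix is provided and maps
--     to a known suffix meaning (like "tefuda" → "From Hand"), it will be appended
--     to the result.
--
--     Examples: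
--         blockphase → [Block Phase]
--         blockreceivephase → [Block Phase] [Receive Phase]
--         receivetossphase → [Receive Phase] [Toss Phase]
--         receivephase (with suffix "tefuda") → [Receive Phase] [From Hand]
--         blockphase (with suffix "tefuda") → [Block Phase] [From Hand]
--
--     Args:
--         keyword_clean (str): Cleaned keyword string (lowercase, no suffix)
--         suffix (str): Optional suffix like "tefuda" or "itadaki"
--
--     Returns:
--         str: Formatted phase keywords with brackets, or None if not a compound phase
--     """
--     # List of phase keywords to check, ordered by length (longest first) to avoid partial matches
--     phase_keywords = ['serve', 'receive', 'attack', 'block', 'toss', 'draw']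
--     phase_keywords_sorted = sorted(phase_keywords, key=len, reverse=True)
--
--     # Remove "phase" suffix if present
--     keyword_to_parse = keyword_clean
--     if keyword_to_parse.endswith('phase'):
--         keyword_to_parse = keyword_to_parse[:-5]  # Remove "phase"
--
--     # Try to extract phase keywords from the string
--     extracted_phases = []
--     remaining = keyword_to_parse
--
--     while remaining:
--         found = False
--         for phase_kw in phase_keywords_sorted:
--             if remaining.startswith(phase_kw):
--                 extracted_phases.append(phase_kw)
--                 remaining = remaining[len(phase_kw):]
--                 found = True
--                 break
--
--         if not found:
--             # Couldn't parse the entire string, this isn't a valid compound phase keyword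
--             return None
--
--     # If we extracted at least one phase keyword, convert to formatted output
--     if extracted_phases:
--         phase_texts = []
--         for phase in extracted_phases:
--             # Map the phase keyword to its full text
--             if phase == 'serve':
--                 phase_texts.append('[Serve Phase]')
--             elif phase == 'receive':
--                 phase_texts.append('[Receive Phase]')
--             elif phase == 'attack':
--                 phase_texts.append('[Attack Phase]')
--             elif phase == 'block':
--                 phase_texts.append('[Block Phase]')
--             elif phase == 'toss':
--                 phase_texts.append('[Toss Phase]')
--             elif phase == 'draw':
--                 phase_texts.append('[Draw Phase]')
--
--         # Append suffix meaning if available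
--         if suffix and suffix in ICON_SUFFIX_MAPPING:
--             phase_texts.append(f'[{ICON_SUFFIX_MAPPING[suffix]}]')
--
--         return ' '.join(phase_texts)
--
--     return None
-- ===== SOURCE B (Python) =====
-- ICON_SUFFIX_MAPPING = {
--     "tefuda": "From Hand",
--     "itadaki": "From Top",
-- }
--
-- # Dispatch on the first character: every phase keyword starts with a distinct letter,
-- # so one dict lookup replaces A's scan over the keyword list, and the bracketed label
-- # is produced in the same pass (no separate extract-then-map elif chain).
-- PHASE_BY_LEAD = {
--     's': ('serve', '[Serve Phase]'),
--     'r': ('receive', '[Receive Phase]'),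
--     'a': ('attack', '[Attack Phase]'),
--     'b': ('block', '[Block Phase]'),
--     't': ('toss', '[Toss Phase]'),
--     'd': ('draw', '[Draw Phase]'),
-- }
--
-- def parse_compound_phase_keyword(keyword_clean, suffix=None):
--     s = keyword_clean[:-5] if keyword_clean.endswith('phase') else keyword_clean
--     if not s:
--         return None
--     parts = []
--     while s:
--         entry = PHASE_BY_LEAD.get(s[0])
--         if entry is None or not s.startswith(entry[0]):
--             return None
--         parts.append(entry[1])
--         s = s[len(entry[0]):]
--     if suffix and suffix in ICON_SUFFIX_MAPPING:
--         parts.append('[' + ICON_SUFFIX_MAPPING[suffix] + ']')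
--     return ' '.join(parts)
-- ===== Notes on version B (the rewrite author's own statement) =====
-- stated objective: alternative
-- what changed: Replaces A's scan over a length-sorted keyword list plus a separate extract-then-elif-chain labelling pass with a single pass that dispatches on the first character via a dict (each phase keyword starts with a distinct letter) and emits the bracketed label immediately.
import Mathlib
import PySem

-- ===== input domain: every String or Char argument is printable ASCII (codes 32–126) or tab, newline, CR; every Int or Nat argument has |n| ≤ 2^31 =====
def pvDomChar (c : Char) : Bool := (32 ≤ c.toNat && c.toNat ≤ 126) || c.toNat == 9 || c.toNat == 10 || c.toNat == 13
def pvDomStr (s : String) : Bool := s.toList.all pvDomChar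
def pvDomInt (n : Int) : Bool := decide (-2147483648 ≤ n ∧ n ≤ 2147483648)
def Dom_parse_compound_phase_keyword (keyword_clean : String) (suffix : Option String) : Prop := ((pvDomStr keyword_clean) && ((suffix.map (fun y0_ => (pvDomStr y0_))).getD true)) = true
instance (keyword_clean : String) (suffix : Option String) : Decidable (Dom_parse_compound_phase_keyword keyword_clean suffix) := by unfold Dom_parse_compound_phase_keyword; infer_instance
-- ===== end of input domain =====

-- B replaces A's scan over a length-sorted keyword list plus a separate elif-chain
-- labelling pass with one pass that dispatches on the first character through a dict
-- and emits the bracketed label immediately; same return value.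

-- ===== PORT A =====

def ICON_SUFFIX_MAPPING : PySem.Dict String String :=
  PySem.Dict.ofList [("tefuda", "From Hand"), ("itadaki", "From Top")]

-- phase_keywords_sorted = sorted(phase_keywords, key=len, reverse=True)
def aPhaseKeywordsSorted : List String :=
  PySem.List.sorted ["serve", "receive", "attack", "block", "toss", "draw"]
    (fun s => PySem.Str.len s) true

-- the inner 'for phase_kw in phase_keywords_sorted' scan of A's while-loop body:
-- the first keyword with remaining.startswith(phase_kw), paired with
-- remaining[len(phase_kw):] (a nonnegative slice = List.drop, exact)
def aFindMatch : List String → List Char → Option (String × List Char)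
  | [], _ => none
  | kw :: kws, rem =>
    if PySem.Chars.startswith rem kw.toList then
      some (kw, rem.drop kw.toList.length)
    else aFindMatch kws rem

-- cited by aLoop's decreasing_by (every keyword is nonempty, so a match consumes ≥ 1 char)
theorem aFindMatch_length_lt {kws : List String} {rem rest : List Char} {kw : String}
    (hne : ∀ k ∈ kws, k.toList ≠ [])
    (h : aFindMatch kws rem = some (kw, rest)) : rest.length < rem.length := by
  induction kws with
  | nil => simp [aFindMatch] at h
  | cons q qs ih =>
    rw [aFindMatch] at h
    split at h
    · rename_i hsw
      have hq : kw = q ∧ rest = rem.drop q.toList.length := by simpa using h.symm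
      have hlen := ((PySem.Chars.startswith_iff _ _).mp hsw).length_le
      have hpos : 0 < q.toList.length := List.length_pos_iff.mpr (hne q (by simp))
      rw [hq.2, List.length_drop]
      omega
    · exact ih (fun x hx => hne x (by simp [hx])) h

-- A's 'while remaining:' loop collecting extracted_phases (none = the mid-loop 'return None')
def aLoop (rem : List Char) : Option (List String) :=
  if rem = [] then some []
  else
    match h : aFindMatch aPhaseKeywordsSorted rem with
    | none => none
    | some (kw, rest) => (aLoop rest).map (fun ks => kw :: ks)
termination_by rem.length
decreasing_by
  exact aFindMatch_length_lt (by decide) h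

-- A's 'for phase in extracted_phases' elif chain building phase_texts
def aPhaseTexts (phases : List String) : List String :=
  phases.foldl (fun acc phase =>
    if phase == "serve" then acc ++ ["[Serve Phase]"]
    else if phase == "receive" then acc ++ ["[Receive Phase]"]
    else if phase == "attack" then acc ++ ["[Attack Phase]"]
    else if phase == "block" then acc ++ ["[Block Phase]"]
    else if phase == "toss" then acc ++ ["[Toss Phase]"]
    else if phase == "draw" then acc ++ ["[Draw Phase]"]
    else acc) []

-- 'if suffix and suffix in ICON_SUFFIX_MAPPING: phase_texts.append(f'[{ICON_SUFFIX_MAPPING[suffix]}]')'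
-- (suffix truthy = not None and not ""; d[suffix] under the 'in' guard is getD, exact)
def addIconSuffix (texts : List String) (suffix : Option String) : List String :=
  match suffix with
  | none => texts
  | some s =>
    if !(s == "") && ICON_SUFFIX_MAPPING.contains s then
      texts ++ ["[" ++ ICON_SUFFIX_MAPPING.getD s "" ++ "]"]
    else texts

def parse_compound_phase_keyword (keyword_clean : String) (suffix : Option String) : Option String :=
  let keyword_to_parse :=
    if PySem.Str.endswith keyword_clean "phase" then
      (PySem.Str.slice keyword_clean none (some (-5))).toList   -- keyword_clean[:-5]
    else keyword_clean.toList
  match aLoop keyword_to_parse with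
  | none => none
  | some extracted_phases =>
    if extracted_phases = [] then none
    else some (PySem.Str.join " " (addIconSuffix (aPhaseTexts extracted_phases) suffix))

-- ===== PORT B =====

-- PHASE_BY_LEAD: first character → (keyword, bracketed label)
def PHASE_BY_LEAD : PySem.Dict Char (String × String) :=
  PySem.Dict.ofList
    [('s', ("serve", "[Serve Phase]")), ('r', ("receive", "[Receive Phase]")),
     ('a', ("attack", "[Attack Phase]")), ('b', ("block", "[Block Phase]")),
     ('t', ("toss", "[Toss Phase]")), ('d', ("draw", "[Draw Phase]"))]

-- cited by bLoop's decreasing_by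
theorem PHASE_BY_LEAD_pos {c : Char} {p : String × String}
    (h : PySem.Dict.get? PHASE_BY_LEAD c = some p) : 0 < p.1.toList.length := by
  have e : PHASE_BY_LEAD = PySem.Dict.mk
    [('s', ("serve", "[Serve Phase]")), ('r', ("receive", "[Receive Phase]")),
     ('a', ("attack", "[Attack Phase]")), ('b', ("block", "[Block Phase]")),
     ('t', ("toss", "[Toss Phase]")), ('d', ("draw", "[Draw Phase]"))] := by decide
  rw [e] at h
  simp only [PySem.Dict.get?_mk_cons] at h
  split_ifs at h <;> first | (cases h; decide) | (exact absurd h (by simp [PySem.Dict.get?]))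

-- B's 'while s:' loop: dict-dispatch on s[0], emit the label at once
def bLoop (s : List Char) : Option (List String) :=
  match s with
  | [] => some []
  | c :: cs =>
    match h : PySem.Dict.get? PHASE_BY_LEAD c with
    | none => none
    | some (kw, label) =>
      if PySem.Chars.startswith (c :: cs) kw.toList then
        (bLoop ((c :: cs).drop kw.toList.length)).map (fun ps => label :: ps)
      else none
termination_by s.length
decreasing_by
  have := PHASE_BY_LEAD_pos h
  simp only [List.length_drop, List.length_cons] at *
  omega

def parse_compound_phase_keyword_alt (keyword_clean : String) (suffix : Option String) : Option String :=
  let s :=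
    if PySem.Str.endswith keyword_clean "phase" then
      (PySem.Str.slice keyword_clean none (some (-5))).toList
    else keyword_clean.toList
  if s = [] then none
  else
    match bLoop s with
    | none => none
    | some parts => some (PySem.Str.join " " (addIconSuffix parts suffix))

-- ===== PRECONDITION & SPEC =====
def Spec_parse_compound_phase_keyword (keyword_clean : String) (suffix : Option String) (out : Option String) : Prop := out = parse_compound_phase_keyword_alt keyword_clean suffix
instance (keyword_clean : String) (suffix : Option String) (out : Option String) : Decidable (Spec_parse_compound_phase_keyword keyword_clean suffix out) := by unfold Spec_parse_compound_phase_keyword; infer_instance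

-- ===== CLAIM (what is proved, stated in full; the proofs are below) =====
def Claim_equal_parse_compound_phase_keyword : Prop := ∀ (keyword_clean : String) (suffix : Option String), Dom_parse_compound_phase_keyword keyword_clean suffix → Spec_parse_compound_phase_keyword keyword_clean suffix (parse_compound_phase_keyword keyword_clean suffix)

-- ===== LEMMAS AND PROOFS =====

theorem aLoop_nil : aLoop [] = some [] := by rw [aLoop]; rfl

theorem aLoop_cons (c : Char) (cs : List Char) :
    aLoop (c :: cs) =
      (match aFindMatch aPhaseKeywordsSorted (c :: cs) with
       | none => none
       | some (kw, rest) => (aLoop rest).map (fun ks => kw :: ks)) := by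
  rw [aLoop]
  simp only [if_neg (List.cons_ne_nil c cs)]
  split <;> rename_i h <;> rw [h]

theorem bLoop_cons (c : Char) (cs : List Char) :
    bLoop (c :: cs) =
      (match PySem.Dict.get? PHASE_BY_LEAD c with
       | none => none
       | some (kw, label) =>
         if PySem.Chars.startswith (c :: cs) kw.toList then
           (bLoop ((c :: cs).drop kw.toList.length)).map (fun ps => label :: ps)
         else none) := by
  rw [bLoop]
  split <;> rename_i h <;> rw [h]

theorem sw_cons (c k : Char) (cs ks : List Char) :
    PySem.Chars.startswith (c :: cs) (k :: ks) = (k == c && PySem.Chars.startswith cs ks) := by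
  rw [Bool.eq_iff_iff, PySem.Chars.startswith_iff, List.cons_prefix_cons,
      Bool.and_eq_true, beq_iff_eq, PySem.Chars.startswith_iff]

-- A's keyword scan and B's first-character dispatch find the same match
theorem dispatch (c : Char) (cs : List Char) :
    aFindMatch aPhaseKeywordsSorted (c :: cs) =
      (match PySem.Dict.get? PHASE_BY_LEAD c with
       | none => none
       | some (kw, _) =>
         if PySem.Chars.startswith (c :: cs) kw.toList then
           some (kw, (c :: cs).drop kw.toList.length)
         else none) := by
  have e : aPhaseKeywordsSorted = ["receive", "attack", "serve", "block", "toss", "draw"] := by decide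
  have ed : PHASE_BY_LEAD = PySem.Dict.mk
    [('s', ("serve", "[Serve Phase]")), ('r', ("receive", "[Receive Phase]")),
     ('a', ("attack", "[Attack Phase]")), ('b', ("block", "[Block Phase]")),
     ('t', ("toss", "[Toss Phase]")), ('d', ("draw", "[Draw Phase]"))] := by decide
  rw [e, ed]
  simp only [aFindMatch, PySem.Dict.get?_mk_cons,
    show "receive".toList = 'r' :: "eceive".toList from rfl,
    show "attack".toList = 'a' :: "ttack".toList from rfl,
    show "serve".toList = 's' :: "erve".toList from rfl,
    show "block".toList = 'b' :: "lock".toList from rfl,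
    show "toss".toList = 't' :: "oss".toList from rfl,
    show "draw".toList = 'd' :: "raw".toList from rfl,
    sw_cons]
  by_cases h1 : c = 's' <;> by_cases h2 : c = 'r' <;> by_cases h3 : c = 'a' <;>
    by_cases h4 : c = 'b' <;> by_cases h5 : c = 't' <;> by_cases h6 : c = 'd' <;>
    first
    | (simp_all [sw_cons, PySem.Dict.get?]; done)
    | simp_all [Ne.symm h1, Ne.symm h2, Ne.symm h3, Ne.symm h4, Ne.symm h5, Ne.symm h6,
        PySem.Dict.get?]

-- A's elif chain as a per-keyword function
def gA (phase : String) : List String :=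
  if phase == "serve" then ["[Serve Phase]"]
  else if phase == "receive" then ["[Receive Phase]"]
  else if phase == "attack" then ["[Attack Phase]"]
  else if phase == "block" then ["[Block Phase]"]
  else if phase == "toss" then ["[Toss Phase]"]
  else if phase == "draw" then ["[Draw Phase]"]
  else []

theorem aPhaseTexts_eq_flatMap (phases : List String) : aPhaseTexts phases = phases.flatMap gA := by
  have hf : ∀ (acc : List String) (phase : String),
      (if phase == "serve" then acc ++ ["[Serve Phase]"]
       else if phase == "receive" then acc ++ ["[Receive Phase]"]
       else if phase == "attack" then acc ++ ["[Attack Phase]"]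
       else if phase == "block" then acc ++ ["[Block Phase]"]
       else if phase == "toss" then acc ++ ["[Toss Phase]"]
       else if phase == "draw" then acc ++ ["[Draw Phase]"]
       else acc) = acc ++ gA phase := by
    intro acc phase
    unfold gA
    split_ifs <;> simp
  unfold aPhaseTexts
  simp only [hf]
  simpa using PySem.List.foldl_append_eq_flatMap gA phases []

-- a PHASE_BY_LEAD entry's label is exactly what A's elif chain emits for its keyword
theorem PHASE_BY_LEAD_label {c : Char} {p : String × String}
    (h : PySem.Dict.get? PHASE_BY_LEAD c = some p) : gA p.1 = [p.2] := by
  have e : PHASE_BY_LEAD = PySem.Dict.mk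
    [('s', ("serve", "[Serve Phase]")), ('r', ("receive", "[Receive Phase]")),
     ('a', ("attack", "[Attack Phase]")), ('b', ("block", "[Block Phase]")),
     ('t', ("toss", "[Toss Phase]")), ('d', ("draw", "[Draw Phase]"))] := by decide
  rw [e] at h
  simp only [PySem.Dict.get?_mk_cons] at h
  split_ifs at h <;> first | (cases h; decide) | (exact absurd h (by simp [PySem.Dict.get?]))

theorem loop_equiv (rem : List Char) : bLoop rem = (aLoop rem).map aPhaseTexts := by
  have main : ∀ (n : Nat) (rem : List Char), rem.length ≤ n →
      bLoop rem = (aLoop rem).map aPhaseTexts := by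
    intro n
    induction n with
    | zero =>
      intro rem h
      have : rem = [] := List.eq_nil_of_length_eq_zero (Nat.le_zero.mp h)
      subst this
      rw [bLoop, aLoop_nil]
      rfl
    | succ n ih =>
      intro rem hlen
      match rem with
      | [] => rw [bLoop, aLoop_nil]; rfl
      | c :: cs =>
        rw [bLoop_cons, aLoop_cons, dispatch c cs]
        match hd : PySem.Dict.get? PHASE_BY_LEAD c with
        | none => rfl
        | some (kw, label) =>
          by_cases hsw : PySem.Chars.startswith (c :: cs) kw.toList = true
          · simp only [hsw, if_true]
            have hrest : ((c :: cs).drop kw.toList.length).length ≤ n := by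
              have hp := PHASE_BY_LEAD_pos hd
              simp only [List.length_cons] at hlen
              simp only [List.length_drop, List.length_cons]
              simp only at hp
              omega
            rw [ih _ hrest]
            cases aLoop ((c :: cs).drop kw.toList.length) with
            | none => rfl
            | some ks =>
              simp only [Option.map_some]
              congr 1
              rw [aPhaseTexts_eq_flatMap, aPhaseTexts_eq_flatMap, List.flatMap_cons]
              have hl : gA kw = [label] := PHASE_BY_LEAD_label hd
              rw [hl]
              rfl
          · simp only [hsw]
            simp
  exact main rem.length rem le_rfl

theorem aLoop_ne_nil {c : Char} {cs : List Char} {ps : List String}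
    (h : aLoop (c :: cs) = some ps) : ps ≠ [] := by
  rw [aLoop_cons] at h
  cases hm : aFindMatch aPhaseKeywordsSorted (c :: cs) with
  | none => rw [hm] at h; cases h
  | some p =>
    obtain ⟨kw, rest⟩ := p
    rw [hm] at h
    simp only [Option.map_eq_some_iff] at h
    obtain ⟨ks, -, rfl⟩ := h
    exact List.cons_ne_nil _ _

-- ===== VERDICT (by name: the statement is the Claim_ definition above) =====
theorem parse_compound_phase_keyword_spec : Claim_equal_parse_compound_phase_keyword := by
  intro keyword_clean suffix _
  unfold Spec_parse_compound_phase_keyword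
  simp only [parse_compound_phase_keyword, parse_compound_phase_keyword_alt]
  generalize (if PySem.Str.endswith keyword_clean "phase" = true then
      (PySem.Str.slice keyword_clean none (some (-5))).toList
    else keyword_clean.toList) = kp
  match kp with
  | [] => rw [aLoop_nil]; simp
  | c :: cs =>
    rw [if_neg (List.cons_ne_nil c cs), loop_equiv]
    cases hal : aLoop (c :: cs) with
    | none => rfl
    | some ps =>
      simp only [Option.map_some]
      show (if ps = [] then none
        else some (PySem.Str.join " " (addIconSuffix (aPhaseTexts ps) suffix))) = _
      rw [if_neg (aLoop_ne_nil hal)]
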